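-- pv_equiv track=rewrite | github.com/anthopark/HackerRank | cutTheStick.py | cutTheStick
-- ===== SOURCE A (Python) =====
-- def cutTheStick(input_list: list)->list:
--     answers = []
--     answers.append(len(input_list))
--     count = 0
--     while len(input_list) > 0:
--         shortest = min(input_list)
--         count = input_list.count(shortest)
--         if len(input_list) - count == 0:
--             break
--         answers.append(len(input_list) - count)
--         for _ in range(count):
--             input_list.remove(shortest)
--
--     return answers
-- ===== SOURCE B (Python) =====
-- # B: count each length once into a dict, walk the distinct lengths in sorted
-- # order subtracting group sizes -- O(n log n) instead of A's repeated min/count/remove.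
-- # Note: A mutates its argument (removes elements); B does not. Equivalence is about the return value.
-- def cutTheStick(input_list: list) -> list:
--     counts = {}
--     for v in input_list:
--         counts[v] = counts.get(v, 0) + 1
--     rem = len(input_list)
--     res = [rem]
--     for v in sorted(counts):
--         rem -= counts[v]
--         if rem > 0:
--             res.append(rem)
--     return res
-- ===== Notes on version B (the rewrite author's own statement) =====
-- stated objective: faster
-- what changed: Replaced the repeated min/count/remove passes over a shrinking list with one counting pass into a dict plus one walk over the sorted distinct lengths subtracting group sizes.
import Mathlib
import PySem

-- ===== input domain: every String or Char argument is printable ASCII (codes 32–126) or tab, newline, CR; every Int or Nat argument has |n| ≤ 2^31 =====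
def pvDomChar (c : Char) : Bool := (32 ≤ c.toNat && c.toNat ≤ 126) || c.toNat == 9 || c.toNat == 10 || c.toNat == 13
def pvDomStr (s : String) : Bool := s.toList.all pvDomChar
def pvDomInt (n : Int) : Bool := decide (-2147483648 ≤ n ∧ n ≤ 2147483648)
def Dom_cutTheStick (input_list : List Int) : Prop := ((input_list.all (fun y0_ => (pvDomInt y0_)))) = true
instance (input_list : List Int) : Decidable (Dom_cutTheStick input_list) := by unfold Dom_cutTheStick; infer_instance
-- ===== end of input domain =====

-- B replaces A's repeated min/count/remove passes with one counting dict plus one walk over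
-- the sorted distinct lengths (objective: faster, asymptotic). A mutates its argument in
-- Python (remove); the equivalence proved here is about the return value only.

-- ===== PORT A =====
-- 'for _ in range(count): input_list.remove(shortest)' — remove? never misses here, so getD keeps the list on the (unreachable) miss
def pvRemoveN_cutTheStick (l : List Int) (m : Int) : Nat → List Int
  | 0 => l
  | c + 1 => pvRemoveN_cutTheStick ((PySem.List.remove? l m).getD l) m c

-- the while loop; fuel bounds the iteration count (each round removes ≥ 1 element), it changes no value
def pvLoop_cutTheStick : Nat → List Int → List Int → List Int
  | 0, _, answers => answers
  | fuel + 1, input_list, answers =>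
    if input_list.length > 0 then
      match PySem.List.min? input_list (fun x => x) with
      | none => answers
      | some shortest =>
        let count := PySem.List.count input_list shortest
        if (input_list.length : Int) - count = 0 then answers
        else pvLoop_cutTheStick fuel (pvRemoveN_cutTheStick input_list shortest count)
               (answers ++ [(input_list.length : Int) - count])
    else answers

def cutTheStick (input_list : List Int) : List Int :=
  pvLoop_cutTheStick (input_list.length + 1) input_list [(input_list.length : Int)]

-- ===== PORT B =====
def cutTheStick_alt (input_list : List Int) : List Int :=
  let counts := input_list.foldl (fun d x => d.insert x (d.getD x 0 + 1)) PySem.Dict.empty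
  let n : Int := input_list.length
  ((PySem.List.sorted counts.keys (fun x => x)).foldl
      (fun (st : Int × List Int) v =>
        let rem := st.1 - counts.getD v 0
        (rem, if rem > 0 then st.2 ++ [rem] else st.2))
      (n, [n])).2

-- ===== PRECONDITION & SPEC =====
def Spec_cutTheStick (input_list : List Int) (out : List Int) : Prop := out = cutTheStick_alt input_list
instance (input_list : List Int) (out : List Int) : Decidable (Spec_cutTheStick input_list out) := by unfold Spec_cutTheStick; infer_instance

-- ===== CLAIM (what is proved, stated in full; the proofs are below) =====
def Claim_equal_cutTheStick : Prop := ∀ (input_list : List Int), Dom_cutTheStick input_list → Spec_cutTheStick input_list (cutTheStick input_list)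

-- ===== LEMMAS AND PROOFS =====

-- helper: one remove step on a list still containing the value keeps a distinct head
lemma pvRemoveN_cons_of_ne (m x : Int) (hx : x ≠ m) :
    ∀ (c : Nat) (l : List Int), c ≤ l.count m →
      pvRemoveN_cutTheStick (x :: l) m c = x :: pvRemoveN_cutTheStick l m c := by
  intro c
  induction c with
  | zero => intro l _; rfl
  | succ c ih =>
    intro l hc
    have hm : m ∈ l := List.count_pos_iff.mp (by omega)
    have h1 : PySem.List.remove? l m = some (l.erase m) :=
      PySem.List.remove?_eq_some_erase l m hm
    have h2 : PySem.List.remove? (x :: l) m = some (x :: l.erase m) := by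
      rw [PySem.List.remove?_cons_of_ne l hx, h1]; rfl
    show pvRemoveN_cutTheStick ((PySem.List.remove? (x :: l) m).getD (x :: l)) m c
        = x :: pvRemoveN_cutTheStick ((PySem.List.remove? l m).getD l) m c
    rw [h1, h2]
    exact ih (l.erase m) (by rw [List.count_erase_self]; omega)

-- removing an element `count` times erases every occurrence, i.e. filters it out
lemma pvRemoveN_eq_filter (m : Int) :
    ∀ (l : List Int), pvRemoveN_cutTheStick l m (l.count m) = l.filter (· ≠ m) := by
  intro l
  induction l with
  | nil => rfl
  | cons x t ih =>
    by_cases hx : x = m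
    · subst hx
      have hcount : (x :: t).count x = t.count x + 1 := by simp
      rw [hcount]
      show pvRemoveN_cutTheStick ((PySem.List.remove? (x :: t) x).getD (x :: t)) x (t.count x)
          = (x :: t).filter (· ≠ x)
      rw [PySem.List.remove?_cons_self]
      simpa using ih
    · have hcount : (x :: t).count m = t.count m := by simp [hx]
      rw [hcount, pvRemoveN_cons_of_ne m x hx (t.count m) t le_rfl, ih]
      simp [hx]

-- the count of all non-m elements: length of the filter
lemma length_filter_ne (m : Int) (l : List Int) :
    (l.filter (· ≠ m)).length = l.length - l.count m := by
  induction l with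
  | nil => rfl
  | cons x t ih =>
    have hle : t.count m ≤ t.length := List.count_le_length
    simp only [ne_eq, decide_not] at ih ⊢
    by_cases hx : x = m
    · subst hx
      simp only [List.filter_cons, decide_true, Bool.not_true, Bool.false_eq_true, if_false,
        List.count_cons_self, List.length_cons, ih]
      omega
    · simp only [List.filter_cons, hx, decide_false, Bool.not_false, if_true,
        List.count_cons, beq_iff_eq, List.length_cons, ih]
      simp only [if_false]
      omega

-- the sorted distinct values of a nonempty list are its minimum followed by the sorted distinct values of the rest
lemma sorted_ofList_cons_min (l : List Int) (m : Int)
    (hmem : m ∈ l) (hmin : ∀ y ∈ l, m ≤ y) :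
    PySem.List.sorted (PySem.Set.ofList l) (fun x => x)
      = m :: PySem.List.sorted (PySem.Set.ofList (l.filter (· ≠ m))) (fun x => x) := by
  apply PySem.List.sorted_eq_of_perm_of_pairwise_lt
  · -- permutation
    have hS' : (PySem.List.sorted (PySem.Set.ofList (l.filter (· ≠ m))) (fun x => x)).Perm
        (PySem.Set.ofList (l.filter (· ≠ m))) := PySem.List.sorted_perm _ _ _
    have hnodup1 : (m :: PySem.List.sorted (PySem.Set.ofList (l.filter (· ≠ m))) (fun x => x)).Nodup := by
      refine List.nodup_cons.mpr ⟨?_, hS'.symm.nodup (PySem.Set.nodup_ofList _)⟩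
      intro hmS
      have : m ∈ l.filter (· ≠ m) := by
        have := (PySem.List.mem_sorted _ _ _ m).mp hmS
        exact (PySem.Set.mem_ofList _ m).mp this
      simp [List.mem_filter] at this
    refine (List.perm_ext_iff_of_nodup hnodup1 (PySem.Set.nodup_ofList l)).mpr ?_
    intro a
    simp only [List.mem_cons, PySem.List.mem_sorted, PySem.Set.mem_ofList, List.mem_filter]
    constructor
    · rintro (rfl | ⟨ha, _⟩)
      · exact hmem
      · exact ha
    · intro ha
      by_cases ham : a = m
      · exact Or.inl ham
      · exact Or.inr ⟨ha, by simpa using ham⟩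
  · -- strictly increasing
    refine List.pairwise_cons.mpr ⟨?_, PySem.List.sorted_ofList_pairwise_lt _⟩
    intro v hv
    have hv' : v ∈ l.filter (· ≠ m) :=
      (PySem.Set.mem_ofList _ v).mp ((PySem.List.mem_sorted _ _ _ v).mp hv)
    have hvl : v ∈ l ∧ v ≠ m := by simpa [List.mem_filter] using hv'
    exact lt_of_le_of_ne (hmin v hvl.1) (fun h => hvl.2 h.symm)

-- main invariant: the while loop equals B's fold over the sorted distinct values,
-- for any count function f agreeing with List.count on the current list
lemma pvLoop_eq_fold :
    ∀ (fuel : Nat) (l : List Int) (ans : List Int) (f : Int → Int),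
      (∀ v ∈ l, f v = (l.count v : Int)) → l.length ≤ fuel →
      pvLoop_cutTheStick fuel l ans
        = ((PySem.List.sorted (PySem.Set.ofList l) (fun x => x)).foldl
            (fun (st : Int × List Int) v =>
              let rem := st.1 - f v
              (rem, if rem > 0 then st.2 ++ [rem] else st.2))
            ((l.length : Int), ans)).2 := by
  intro fuel
  induction fuel with
  | zero =>
    intro l ans f _ hlen
    have : l = [] := List.eq_nil_of_length_eq_zero (Nat.le_zero.mp hlen)
    subst this; rfl
  | succ fuel ih =>
    intro l ans f hf hlen
    rcases l with _ | ⟨x, t⟩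
    · rfl
    set l := x :: t with hl
    have hlne : l ≠ [] := by simp [hl]
    obtain ⟨m, hm⟩ : ∃ m, PySem.List.min? l (fun x => x) = some m := by
      rcases h : PySem.List.min? l (fun x => x) with _ | m
      · exact absurd ((PySem.List.min?_eq_none_iff l _).mp h) hlne
      · exact ⟨m, rfl⟩
    have hmem : m ∈ l := PySem.List.min?_mem hm
    have hmin : ∀ y ∈ l, m ≤ y := PySem.List.min?_isMin hm
    have hcpos : 0 < l.count m := List.count_pos_iff.mpr hmem
    have hcle : l.count m ≤ l.length := List.count_le_length
    have hfm : f m = (l.count m : Int) := hf m hmem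
    have hsorted := sorted_ofList_cons_min l m hmem hmin
    have hcount_eq : PySem.List.count l m = l.count m := PySem.List.count_eq l m
    by_cases hz : (l.length : Int) - (l.count m : Int) = 0
    · -- A breaks; B's single fold step appends nothing
      have hall : ∀ b ∈ l, m = b :=
        List.count_eq_length.mp (by omega)
      have hfilter : l.filter (· ≠ m) = [] := by
        rw [List.filter_eq_nil_iff]
        intro a ha
        simp [(hall a ha).symm]
      have hLHS : pvLoop_cutTheStick (fuel + 1) l ans = ans := by
        show (if l.length > 0 then _ else ans) = ans
        rw [if_pos (by simp [hl])]
        rw [hm]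
        simp only [hcount_eq]
        rw [if_pos hz]
      rw [hLHS, hsorted, hfilter]
      have hnil : PySem.List.sorted (PySem.Set.ofList ([] : List Int)) (fun x => x) = [] := rfl
      rw [hnil, List.foldl_cons, List.foldl_nil]
      simp only [hfm]
      rw [if_neg (by simpa using (by omega : ¬ ((l.length : Int) - (l.count m : Int) > 0)))]
    · -- A recurses; B's first fold step appends len - count
      have hstep : pvLoop_cutTheStick (fuel + 1) l ans
          = pvLoop_cutTheStick fuel (pvRemoveN_cutTheStick l m (l.count m))
              (ans ++ [(l.length : Int) - (l.count m : Int)]) := by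
        show (if l.length > 0 then _ else ans) = _
        rw [if_pos (by simp [hl])]
        rw [hm]
        simp only [hcount_eq]
        rw [if_neg hz]
      have hflen : (l.filter (· ≠ m)).length = l.length - l.count m :=
        length_filter_ne m l
      have hf' : ∀ v ∈ l.filter (· ≠ m), f v = ((l.filter (· ≠ m)).count v : Int) := by
        intro v hv
        have hvl : v ∈ l ∧ v ≠ m := by simpa [List.mem_filter] using hv
        rw [List.count_filter (by simpa using hvl.2), hf v hvl.1]
      rw [hstep, pvRemoveN_eq_filter m l,
        ih (l.filter (· ≠ m)) (ans ++ [(l.length : Int) - (l.count m : Int)]) f hf' (by omega),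
        hsorted]
      show (List.foldl
            (fun (st : Int × List Int) v =>
              let rem := st.1 - f v
              (rem, if rem > 0 then st.2 ++ [rem] else st.2))
            (((l.filter (· ≠ m)).length : Int), ans ++ [(l.length : Int) - (l.count m : Int)])
            (PySem.List.sorted (PySem.Set.ofList (l.filter (· ≠ m))) (fun x => x))).2
          = (List.foldl
            (fun (st : Int × List Int) v =>
              let rem := st.1 - f v
              (rem, if rem > 0 then st.2 ++ [rem] else st.2))
            ((l.length : Int) - f m,
              if (l.length : Int) - f m > 0 then ans ++ [(l.length : Int) - f m] else ans)
            (PySem.List.sorted (PySem.Set.ofList (l.filter (· ≠ m))) (fun x => x))).2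
      rw [hfm, if_pos (by omega)]
      have hinit : (((l.filter (· ≠ m)).length : Nat) : Int)
          = (l.length : Int) - (l.count m : Int) := by
        rw [hflen]; omega
      rw [hinit]

-- ===== VERDICT (by name: the statement is the Claim_ definition above) =====
theorem cutTheStick_spec : Claim_equal_cutTheStick := by
  intro l _
  show cutTheStick l = cutTheStick_alt l
  unfold cutTheStick cutTheStick_alt
  simp only [PySem.Dict.foldl_insert_getD_add_one_eq_counter, PySem.Dict.keys_counter,
    PySem.Dict.getD_counter]
  exact pvLoop_eq_fold (l.length + 1) l [(l.length : Int)]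
        (fun v => (l.count v : Int)) (fun v _ => rfl) (Nat.le_succ _)
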